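-- pv_equiv track=rewrite | github.com/dyang-Y/First_project | accounts/forms.py | contains_consecutive_chars
-- ===== SOURCE A (Python) =====
-- def contains_consecutive_chars(value, length=3):
--     # 숫자 연속성 체크
--     for i in range(10 - length + 1):
--         consecutive_nums = ''.join(map(str, range(i, i + length)))
--         if consecutive_nums in value:
--             return True
--
--         # 역순 체크
--         reverse_nums = ''.join(map(str, range(i + length - 1, i - 1, -1)))
--         if reverse_nums in value:
--             return True
--
--     # 알파벳 연속성 체크
--     for i in range(26 - length + 1):
--         # 소문자 연속성
--         consecutive_chars = ''.join(chr(ord('a') + j) for j in range(i, i + length))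
--         if consecutive_chars in value.lower():
--             return True
--
--         # 역순 체크
--         reverse_chars = ''.join(chr(ord('a') + j) for j in range(i + length - 1, i - 1, -1))
--         if reverse_chars in value.lower():
--             return True
--
--     return False
-- ===== SOURCE B (Python) =====
-- def _monotone(w):
--     up = all(ord(b) - ord(a) == 1 for a, b in zip(w, w[1:]))
--     down = all(ord(a) - ord(b) == 1 for a, b in zip(w, w[1:]))
--     return up or down
--
--
-- def contains_consecutive_chars(value, length=3):
--     # Slide a window of `length` over the string and test each window directly,
--     # instead of generating every possible pattern and substring-searching it.
--     if length <= 0: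
--         return True
--     n = len(value)
--     for j in range(n - length + 1):
--         w = value[j:j + length]
--         if all('0' <= c <= '9' for c in w):
--             if _monotone(w):
--                 return True
--         else:
--             w = w.lower()
--             if all('a' <= c <= 'z' for c in w) and _monotone(w):
--                 return True
--     return False
-- ===== Notes on version B (the rewrite author's own statement) =====
-- stated objective: simpler
-- what changed: A generates every ascending/descending digit and letter pattern of the given length and substring-searches each in the value; B makes a single sliding-window pass over the value and tests each window's characters directly for being a digit run or (after lowercasing) a letter run.
import Mathlib
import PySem

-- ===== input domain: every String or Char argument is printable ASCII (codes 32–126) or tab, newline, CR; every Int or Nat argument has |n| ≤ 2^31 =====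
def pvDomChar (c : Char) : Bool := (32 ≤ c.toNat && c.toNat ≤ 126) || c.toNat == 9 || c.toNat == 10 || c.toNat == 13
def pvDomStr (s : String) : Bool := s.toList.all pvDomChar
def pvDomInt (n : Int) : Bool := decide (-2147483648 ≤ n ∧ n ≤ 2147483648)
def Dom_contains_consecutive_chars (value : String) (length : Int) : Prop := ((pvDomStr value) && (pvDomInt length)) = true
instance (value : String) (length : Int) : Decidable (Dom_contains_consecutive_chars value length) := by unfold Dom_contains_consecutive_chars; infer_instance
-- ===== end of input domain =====

-- B replaces A's generate-every-pattern-and-substring-search strategy by a single sliding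
-- window over the string that tests each window's characters directly (objective: simpler).

-- ===== PORT A =====
-- literal transliteration of A: two pattern loops with early return True = List.any;
-- ''.join(map(str, range(...))) and ''.join(chr(ord('a')+j) for j in range(...)) via PySem.Str.join
def contains_consecutive_chars (value : String) (length : Int) : Bool :=
  ((PySem.List.pyRange 0 (10 - length + 1) 1).any (fun i =>
      PySem.Str.isIn (PySem.Str.join "" ((PySem.List.pyRange i (i + length) 1).map PySem.Int.toStr)) value
   || PySem.Str.isIn (PySem.Str.join "" ((PySem.List.pyRange (i + length - 1) (i - 1) (-1)).map PySem.Int.toStr)) value))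
  ||
  ((PySem.List.pyRange 0 (26 - length + 1) 1).any (fun i =>
      PySem.Str.isIn (PySem.Str.join "" ((PySem.List.pyRange i (i + length) 1).map (fun j => String.ofList [Char.ofNat (97 + j).toNat]))) (PySem.Str.lower value)
   || PySem.Str.isIn (PySem.Str.join "" ((PySem.List.pyRange (i + length - 1) (i - 1) (-1)).map (fun j => String.ofList [Char.ofNat (97 + j).toNat]))) (PySem.Str.lower value)))

-- ===== PORT B =====
-- transliteration of Source B's helper _monotone: zip(w, w[1:]) with all(...) twice
def pvMonotone (w : List Char) : Bool :=
  (w.zip (w.drop 1)).all (fun p => (p.2.toNat : Int) - (p.1.toNat : Int) == 1)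
  || (w.zip (w.drop 1)).all (fun p => (p.1.toNat : Int) - (p.2.toNat : Int) == 1)

-- transliteration of Source B: one window loop with early return True = List.any;
-- per-window character tests, w.lower() only on the letter branch
def contains_consecutive_chars_alt (value : String) (length : Int) : Bool :=
  if length ≤ 0 then true
  else
    (PySem.List.pyRange 0 (PySem.Str.len value - length + 1) 1).any (fun j =>
      let w := PySem.Str.slice value (some j) (some (j + length))
      if w.toList.all (fun c => decide ('0' ≤ c ∧ c ≤ '9')) then
        pvMonotone w.toList
      else
        let w' := PySem.Str.lower w
        w'.toList.all (fun c => decide ('a' ≤ c ∧ c ≤ 'z')) && pvMonotone w'.toList)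

-- ===== PRECONDITION & SPEC =====
def Spec_contains_consecutive_chars (value : String) (length : Int) (out : Bool) : Prop := out = contains_consecutive_chars_alt value length
instance (value : String) (length : Int) (out : Bool) : Decidable (Spec_contains_consecutive_chars value length out) := by unfold Spec_contains_consecutive_chars; infer_instance

-- ===== CLAIM (what is proved, stated in full; the proofs are below) =====
def Claim_equal_contains_consecutive_chars : Prop := ∀ (value : String) (length : Int), Dom_contains_consecutive_chars value length → Spec_contains_consecutive_chars value length (contains_consecutive_chars value length)

-- ===== LEMMAS AND PROOFS =====

-- ---- proof-side vocabulary ----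

/-- the ascending pattern of `L` consecutive code points starting at code point `base + i` -/
def pvPat (base : Nat) (i L : Int) : List Char :=
  (PySem.List.pyRange i (i + L) 1).map (fun j => Char.ofNat ((base : Int) + j).toNat)

def pvUp (w : List Char) : Prop := ∀ k, (h : k + 1 < w.length) → (w[k + 1]'h).toNat = (w[k]'(by omega)).toNat + 1
def pvDown (w : List Char) : Prop := ∀ k, (h : k + 1 < w.length) → (w[k]'(by omega)).toNat = (w[k + 1]'h).toNat + 1
def pvInRange (base cnt : Nat) (w : List Char) : Prop := ∀ c ∈ w, base ≤ c.toNat ∧ c.toNat < base + cnt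

/-- the window of `length` characters of `v` starting at `j` -/
def pvWin (v : List Char) (length : Int) (j : Nat) : List Char := (v.drop j).take length.toNat

/-- the common middle form of both programs: some window is an ascending or descending
    digit run, or lowercases to an ascending or descending letter run -/
def pvMid (value : String) (length : Int) : Prop :=
  ∃ j : Nat, j + length.toNat ≤ value.toList.length ∧
    ((pvInRange 48 10 (pvWin value.toList length j) ∧
        (pvUp (pvWin value.toList length j) ∨ pvDown (pvWin value.toList length j)))
     ∨ (pvInRange 97 26 (PySem.Chars.lower (pvWin value.toList length j)) ∧
        (pvUp (PySem.Chars.lower (pvWin value.toList length j)) ∨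
         pvDown (PySem.Chars.lower (pvWin value.toList length j)))))

-- ---- small facts ----

lemma pvCharLe_iff (a c : Char) : a ≤ c ↔ a.toNat ≤ c.toNat := by
  rw [Char.le_def]; exact UInt32.le_iff_toNat_le

lemma pvToNat_ofNat (n : Nat) (h : n < 55296) : (Char.ofNat n).toNat = n := by
  rw [Char.ofNat, dif_pos (by exact Or.inl h)]
  simp [Char.ofNatAux, Char.toNat, UInt32.toNat_ofNatLT]

lemma pvLowerChar_lt (c : Char) (h : c.toNat < 65) : PySem.Chars.lowerChar c = c := by
  unfold PySem.Chars.lowerChar PySem.Chars.isupper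
  rw [if_neg]
  simp only [Bool.and_eq_true, decide_eq_true_eq, not_and]
  intro hA
  rw [Char.le_def, UInt32.le_iff_toNat_le] at hA
  have h65 : ('A').val.toNat = 65 := by decide
  have hc : c.toNat = c.val.toNat := rfl
  omega

lemma pvZipAll (w : List Char) (p : Char × Char → Bool) :
    ((w.zip (w.drop 1)).all p = true) ↔ ∀ k, (h : k + 1 < w.length) → p ((w[k]'(by omega)), (w[k+1]'h)) = true := by
  rw [List.all_eq_true]
  have hlen : (w.zip (w.drop 1)).length = w.length - 1 := by
    simp [List.length_zip]
  constructor
  · intro h k hk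
    have hk' : k < (w.zip (w.drop 1)).length := by omega
    have := h _ (List.getElem_mem hk')
    simpa [List.getElem_zip, List.getElem_drop] using this
  · intro h x hx
    obtain ⟨k, hk, rfl⟩ := List.mem_iff_getElem.1 hx
    have hk1 : k + 1 < w.length := by omega
    simpa [List.getElem_zip, List.getElem_drop] using h k hk1

lemma pvMonotone_iff (w : List Char) : pvMonotone w = true ↔ pvUp w ∨ pvDown w := by
  have h1 : ((w.zip (w.drop 1)).all (fun p => ((p.2.toNat : Int) - (p.1.toNat : Int) == 1)) = true) ↔ pvUp w := by
    rw [pvZipAll]; unfold pvUp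
    constructor
    · intro H k h; have := H k h; simp only [beq_iff_eq] at this; omega
    · intro H k h; have := H k h; simp only [beq_iff_eq]; omega
  have h2 : ((w.zip (w.drop 1)).all (fun p => ((p.1.toNat : Int) - (p.2.toNat : Int) == 1)) = true) ↔ pvDown w := by
    rw [pvZipAll]; unfold pvDown
    constructor
    · intro H k h; have := H k h; simp only [beq_iff_eq] at this; omega
    · intro H k h; have := H k h; simp only [beq_iff_eq]; omega
  unfold pvMonotone
  rw [Bool.or_eq_true, h1, h2]

lemma pvAllRange_iff (w : List Char) (a b : Char) :
    (w.all (fun c => decide (a ≤ c ∧ c ≤ b)) = true) ↔ ∀ c ∈ w, a.toNat ≤ c.toNat ∧ c.toNat ≤ b.toNat := by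
  rw [List.all_eq_true]
  refine forall₂_congr (fun c _ => ?_)
  simp [pvCharLe_iff]

lemma pvDigitAll_iff (w : List Char) :
    (w.all (fun c => decide ('0' ≤ c ∧ c ≤ '9')) = true) ↔ pvInRange 48 10 w := by
  rw [pvAllRange_iff]; unfold pvInRange
  refine forall₂_congr (fun c _ => ?_)
  have h0 : ('0' : Char).toNat = 48 := rfl
  have h9 : ('9' : Char).toNat = 57 := rfl
  rw [h0, h9]
  omega

lemma pvLetterAll_iff (w : List Char) :
    (w.all (fun c => decide ('a' ≤ c ∧ c ≤ 'z')) = true) ↔ pvInRange 97 26 w := by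
  rw [pvAllRange_iff]; unfold pvInRange
  refine forall₂_congr (fun c _ => ?_)
  have h0 : ('a' : Char).toNat = 97 := rfl
  have h9 : ('z' : Char).toNat = 122 := rfl
  rw [h0, h9]
  omega

-- ---- pattern facts ----

lemma pvLength_pat (base : Nat) (i L : Int) : (pvPat base i L).length = L.toNat := by
  have : i + L - i = L := by ring
  simp [pvPat, PySem.List.length_pyRange_one, this]

lemma pvGetElem_pat (base : Nat) (i L : Int) (k : Nat) (h : k < (pvPat base i L).length) :
    (pvPat base i L)[k] = Char.ofNat ((base : Int) + (i + k)).toNat := by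
  simp [pvPat, PySem.List.getElem_pyRange_one]

lemma pvGetElem_patrev (base : Nat) (i L : Int) (k : Nat) (h : k < (pvPat base i L).reverse.length) :
    (pvPat base i L).reverse[k] = Char.ofNat ((base : Int) + (i + (L - 1 - k))).toNat := by
  have hlen := pvLength_pat base i L
  have hk : k < L.toNat := by simpa [List.length_reverse, hlen] using h
  rw [List.getElem_reverse, pvGetElem_pat]
  congr 2
  omega

-- ---- the core run characterisations ----

lemma pvRun_iff (base cnt : Nat) (hb : base + cnt ≤ 128) (L : Int) (hL : 1 ≤ L)
    (w : List Char) (hw : (w.length : Int) = L) :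
    (∃ i : Int, 0 ≤ i ∧ i < (cnt : Int) - L + 1 ∧ w = pvPat base i L) ↔ pvInRange base cnt w ∧ pvUp w := by
  constructor
  · rintro ⟨i, hi0, hiU, rfl⟩
    have hlen := pvLength_pat base i L
    constructor
    · intro c hc
      obtain ⟨k, hk, rfl⟩ := List.mem_iff_getElem.1 hc
      have hkL : (k : Int) < L := by rw [hlen] at hk; omega
      rw [pvGetElem_pat, pvToNat_ofNat _ (by omega)]
      omega
    · intro k h
      have hkL : (k : Int) + 1 < L := by rw [hlen] at h; omega
      rw [pvGetElem_pat, pvGetElem_pat, pvToNat_ofNat _ (by omega), pvToNat_ofNat _ (by omega)]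
      omega
  · rintro ⟨hr, hu⟩
    have hpos : 0 < w.length := by omega
    have key : ∀ k, (hk : k < w.length) → (w[k]'hk).toNat = (w[0]'hpos).toNat + k := by
      intro k
      induction k with
      | zero => intro hk; rfl
      | succ k ih =>
        intro hk
        have hk' : k < w.length := by omega
        rw [hu k hk, ih hk']
        omega
    have h0 := hr _ (List.getElem_mem hpos)
    have hlast := hr _ (List.getElem_mem (Nat.sub_lt hpos Nat.one_pos))
    rw [key (w.length - 1) (Nat.sub_lt hpos Nat.one_pos)] at hlast
    obtain ⟨i, hi⟩ : ∃ i : Int, i = ((w[0]'hpos).toNat : Int) - base := ⟨_, rfl⟩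
    refine ⟨i, by omega, by omega, ?_⟩
    apply List.ext_getElem
    · rw [pvLength_pat]; omega
    · intro k hk hk2
      rw [pvGetElem_pat]
      have hkk := key k hk
      have heq : ((base : Int) + (i + k)).toNat = (w[k]'hk).toNat := by omega
      rw [heq, Char.ofNat_toNat]

lemma pvRunRev_iff (base cnt : Nat) (hb : base + cnt ≤ 128) (L : Int) (hL : 1 ≤ L)
    (w : List Char) (hw : (w.length : Int) = L) :
    (∃ i : Int, 0 ≤ i ∧ i < (cnt : Int) - L + 1 ∧ w = (pvPat base i L).reverse) ↔ pvInRange base cnt w ∧ pvDown w := by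
  constructor
  · rintro ⟨i, hi0, hiU, rfl⟩
    have hlen : (pvPat base i L).reverse.length = L.toNat := by
      simp [List.length_reverse, pvLength_pat]
    constructor
    · intro c hc
      rw [List.mem_reverse] at hc
      obtain ⟨k, hk, rfl⟩ := List.mem_iff_getElem.1 hc
      have hkL : (k : Int) < L := by rw [pvLength_pat] at hk; omega
      rw [pvGetElem_pat, pvToNat_ofNat _ (by omega)]
      omega
    · intro k h
      have hkL : (k : Int) + 1 < L := by rw [hlen] at h; omega
      rw [pvGetElem_patrev, pvGetElem_patrev, pvToNat_ofNat _ (by omega), pvToNat_ofNat _ (by omega)]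
      omega
  · rintro ⟨hr, hd⟩
    have hpos : 0 < w.length := by omega
    have key : ∀ k, (hk : k < w.length) → (w[k]'hk).toNat + k = (w[0]'hpos).toNat := by
      intro k
      induction k with
      | zero => intro hk; rfl
      | succ k ih =>
        intro hk
        have hk' : k < w.length := by omega
        have h1 := hd k hk
        have h2 := ih hk'
        omega
    have h0 := hr _ (List.getElem_mem hpos)
    have hlast := hr _ (List.getElem_mem (Nat.sub_lt hpos Nat.one_pos))
    have hkey := key (w.length - 1) (Nat.sub_lt hpos Nat.one_pos)
    obtain ⟨i, hi⟩ : ∃ i : Int, i = ((w[0]'hpos).toNat : Int) - base - (L - 1) := ⟨_, rfl⟩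
    refine ⟨i, by omega, by omega, ?_⟩
    apply List.ext_getElem
    · simp only [List.length_reverse, pvLength_pat]; omega
    · intro k hk hk2
      rw [pvGetElem_patrev]
      have hkk := key k hk
      have heq : ((base : Int) + (i + (L - 1 - k))).toNat = (w[k]'hk).toNat := by omega
      rw [heq, Char.ofNat_toNat]

-- ---- A's pattern strings viewed as pvPat ----

lemma pvMapStr (i L : Int) (h0 : 0 ≤ i) (h1 : i + L ≤ 10) :
    (PySem.List.pyRange i (i + L) 1).map (fun j => (PySem.Int.toStr j).toList)
      = (pvPat 48 i L).map (fun c => [c]) := by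
  unfold pvPat
  rw [List.map_map]
  apply List.map_congr_left
  intro j hj
  rw [PySem.List.mem_pyRange_one] at hj
  have hj0 : 0 ≤ j := by omega
  have hj10 : j < 10 := by omega
  simp only [Function.comp, PySem.Int.toList_toStr]
  interval_cases j <;> decide

lemma pvRevRange (i L : Int) :
    PySem.List.pyRange (i + L - 1) (i - 1) (-1) = (PySem.List.pyRange i (i + L) 1).reverse := by
  rw [PySem.List.pyRange_neg_one_eq_reverse]
  have e1 : i - 1 + 1 = i := by ring
  have e2 : i + L - 1 + 1 = i + L := by ring
  rw [e1, e2]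

lemma pvDigitAsc (i L : Int) (h0 : 0 ≤ i) (h1 : i + L ≤ 10) :
    (PySem.Str.join "" ((PySem.List.pyRange i (i + L) 1).map PySem.Int.toStr)).toList = pvPat 48 i L := by
  rw [PySem.Str.toList_join, List.map_map]
  have hmap : (PySem.List.pyRange i (i + L) 1).map (String.toList ∘ PySem.Int.toStr)
      = (pvPat 48 i L).map (fun c => [c]) := pvMapStr i L h0 h1
  rw [hmap, show ("" : String).toList = [] from rfl, PySem.Chars.join_nil_singletons]

lemma pvDigitDesc (i L : Int) (h0 : 0 ≤ i) (h1 : i + L ≤ 10) :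
    (PySem.Str.join "" ((PySem.List.pyRange (i + L - 1) (i - 1) (-1)).map PySem.Int.toStr)).toList = (pvPat 48 i L).reverse := by
  rw [pvRevRange, PySem.Str.toList_join, List.map_map, List.map_reverse]
  have hmap : (PySem.List.pyRange i (i + L) 1).map (String.toList ∘ PySem.Int.toStr)
      = (pvPat 48 i L).map (fun c => [c]) := pvMapStr i L h0 h1
  rw [hmap, ← List.map_reverse, show ("" : String).toList = [] from rfl, PySem.Chars.join_nil_singletons]

lemma pvMapChr (i L : Int) :
    (PySem.List.pyRange i (i + L) 1).map (String.toList ∘ fun j => String.ofList [Char.ofNat (97 + j).toNat])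
      = (pvPat 97 i L).map (fun c => [c]) := by
  unfold pvPat
  rw [List.map_map]
  apply List.map_congr_left
  intro j _
  simp only [Function.comp]
  rw [String.toList_ofList]
  norm_num

lemma pvLetterAsc (i L : Int) :
    (PySem.Str.join "" ((PySem.List.pyRange i (i + L) 1).map (fun j => String.ofList [Char.ofNat (97 + j).toNat]))).toList = pvPat 97 i L := by
  rw [PySem.Str.toList_join, List.map_map, pvMapChr, show ("" : String).toList = [] from rfl, PySem.Chars.join_nil_singletons]

lemma pvLetterDesc (i L : Int) :
    (PySem.Str.join "" ((PySem.List.pyRange (i + L - 1) (i - 1) (-1)).map (fun j => String.ofList [Char.ofNat (97 + j).toNat]))).toList = (pvPat 97 i L).reverse := by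
  rw [pvRevRange, PySem.Str.toList_join, List.map_map, List.map_reverse, pvMapChr,
      ← List.map_reverse, show ("" : String).toList = [] from rfl, PySem.Chars.join_nil_singletons]

-- ---- infix ⇔ window ----

lemma pvInfix_iff_window (p v : List Char) (hp : 0 < p.length) :
    p <:+: v ↔ ∃ j : Nat, j + p.length ≤ v.length ∧ (v.drop j).take p.length = p := by
  constructor
  · intro h
    have hin : PySem.Chars.isIn p v = true := (PySem.Chars.isIn_iff_infix p v).2 h
    obtain ⟨j, hpre⟩ := (PySem.Chars.exists_prefix_drop_iff_isIn p v).2 hin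
    have hlenle := hpre.length_le
    rw [List.length_drop] at hlenle
    refine ⟨j, by omega, ?_⟩
    exact (List.prefix_iff_eq_take.1 hpre).symm
  · rintro ⟨j, hle, heq⟩
    have hpre : p <+: v.drop j := List.prefix_iff_eq_take.2 heq.symm
    exact hpre.isInfix.trans (List.drop_suffix j v).isInfix

lemma pvWin_length (v : List Char) (length : Int) (j : Nat) (h : j + length.toNat ≤ v.length) :
    (pvWin v length j).length = length.toNat := by
  simp [pvWin]
  omega

lemma pvLowerWindow (v : List Char) (length : Int) (j : Nat) :
    ((PySem.Chars.lower v).drop j).take length.toNat = PySem.Chars.lower (pvWin v length j) := by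
  unfold PySem.Chars.lower pvWin
  rw [List.map_take, List.map_drop]

-- ---- A ⇔ the middle form ----

lemma pvA_iff (value : String) (length : Int) (hL : 1 ≤ length) :
    contains_consecutive_chars value length = true ↔ pvMid value length := by
  unfold contains_consecutive_chars pvMid
  rw [Bool.or_eq_true, List.any_eq_true, List.any_eq_true]
  constructor
  · rintro (⟨i, hmem, hbody⟩ | ⟨i, hmem, hbody⟩)
    · -- digit loop hit
      rw [PySem.List.mem_pyRange_one] at hmem
      obtain ⟨hi0, hiU⟩ := hmem
      have hb1 : i + length ≤ 10 := by omega
      rw [Bool.or_eq_true] at hbody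
      cases hbody with
      | inl h =>
        rw [PySem.Str.isIn_iff_infix, pvDigitAsc i length hi0 hb1] at h
        have hplen := pvLength_pat 48 i length
        obtain ⟨j, hj, heq⟩ := (pvInfix_iff_window _ _ (by omega)).1 h
        rw [hplen] at hj heq
        refine ⟨j, hj, Or.inl ?_⟩
        have hwlen : ((pvWin value.toList length j).length : Int) = length := by
          rw [pvWin_length _ _ _ hj]; omega
        have hex : ∃ i' : Int, 0 ≤ i' ∧ i' < ((10 : Nat) : Int) - length + 1 ∧ pvWin value.toList length j = pvPat 48 i' length :=
          ⟨i, hi0, by push_cast; omega, heq⟩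
        obtain ⟨hr, hu⟩ := (pvRun_iff 48 10 (by norm_num) length hL _ hwlen).1 hex
        exact ⟨hr, Or.inl hu⟩
      | inr h =>
        rw [PySem.Str.isIn_iff_infix, pvDigitDesc i length hi0 hb1] at h
        have hplen : (pvPat 48 i length).reverse.length = length.toNat := by
          rw [List.length_reverse, pvLength_pat]
        obtain ⟨j, hj, heq⟩ := (pvInfix_iff_window _ _ (by omega)).1 h
        rw [hplen] at hj heq
        refine ⟨j, hj, Or.inl ?_⟩
        have hwlen : ((pvWin value.toList length j).length : Int) = length := by
          rw [pvWin_length _ _ _ hj]; omega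
        have hex : ∃ i' : Int, 0 ≤ i' ∧ i' < ((10 : Nat) : Int) - length + 1 ∧ pvWin value.toList length j = (pvPat 48 i' length).reverse :=
          ⟨i, hi0, by push_cast; omega, heq⟩
        obtain ⟨hr, hd⟩ := (pvRunRev_iff 48 10 (by norm_num) length hL _ hwlen).1 hex
        exact ⟨hr, Or.inr hd⟩
    · -- letter loop hit
      rw [PySem.List.mem_pyRange_one] at hmem
      obtain ⟨hi0, hiU⟩ := hmem
      have hlv : (PySem.Str.lower value).toList = PySem.Chars.lower value.toList := PySem.Str.toList_lower value
      have hlvlen : (PySem.Chars.lower value.toList).length = value.toList.length := by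
        unfold PySem.Chars.lower; rw [List.length_map]
      rw [Bool.or_eq_true] at hbody
      cases hbody with
      | inl h =>
        rw [PySem.Str.isIn_iff_infix, pvLetterAsc i length, hlv] at h
        have hplen := pvLength_pat 97 i length
        obtain ⟨j, hj, heq⟩ := (pvInfix_iff_window _ _ (by omega)).1 h
        rw [hplen] at hj heq
        rw [hlvlen] at hj
        rw [pvLowerWindow] at heq
        refine ⟨j, hj, Or.inr ?_⟩
        have hwlen : ((PySem.Chars.lower (pvWin value.toList length j)).length : Int) = length := by
          unfold PySem.Chars.lower
          rw [List.length_map, pvWin_length _ _ _ hj]; omega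
        have hex : ∃ i' : Int, 0 ≤ i' ∧ i' < ((26 : Nat) : Int) - length + 1 ∧ PySem.Chars.lower (pvWin value.toList length j) = pvPat 97 i' length :=
          ⟨i, hi0, by push_cast; omega, heq⟩
        obtain ⟨hr, hu⟩ := (pvRun_iff 97 26 (by norm_num) length hL _ hwlen).1 hex
        exact ⟨hr, Or.inl hu⟩
      | inr h =>
        rw [PySem.Str.isIn_iff_infix, pvLetterDesc i length, hlv] at h
        have hplen : (pvPat 97 i length).reverse.length = length.toNat := by
          rw [List.length_reverse, pvLength_pat]
        obtain ⟨j, hj, heq⟩ := (pvInfix_iff_window _ _ (by omega)).1 h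
        rw [hplen] at hj heq
        rw [hlvlen] at hj
        rw [pvLowerWindow] at heq
        refine ⟨j, hj, Or.inr ?_⟩
        have hwlen : ((PySem.Chars.lower (pvWin value.toList length j)).length : Int) = length := by
          unfold PySem.Chars.lower
          rw [List.length_map, pvWin_length _ _ _ hj]; omega
        have hex : ∃ i' : Int, 0 ≤ i' ∧ i' < ((26 : Nat) : Int) - length + 1 ∧ PySem.Chars.lower (pvWin value.toList length j) = (pvPat 97 i' length).reverse :=
          ⟨i, hi0, by push_cast; omega, heq⟩
        obtain ⟨hr, hd⟩ := (pvRunRev_iff 97 26 (by norm_num) length hL _ hwlen).1 hex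
        exact ⟨hr, Or.inr hd⟩
  · rintro ⟨j, hj, hcase⟩
    cases hcase with
    | inl hdig =>
      obtain ⟨hr, hud⟩ := hdig
      left
      have hwlen : ((pvWin value.toList length j).length : Int) = length := by
        rw [pvWin_length _ _ _ hj]; omega
      cases hud with
      | inl hu =>
        obtain ⟨i, hi0, hiU, hweq⟩ := (pvRun_iff 48 10 (by norm_num) length hL _ hwlen).2 ⟨hr, hu⟩
        have hiU' : i < 10 - length + 1 := by push_cast at hiU; omega
        refine ⟨i, PySem.List.mem_pyRange_one.2 ⟨hi0, hiU'⟩, ?_⟩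
        rw [Bool.or_eq_true]; left
        rw [PySem.Str.isIn_iff_infix, pvDigitAsc i length hi0 (by omega)]
        apply (pvInfix_iff_window _ _ (by rw [pvLength_pat]; omega)).2
        refine ⟨j, ?_, ?_⟩
        · rw [pvLength_pat]; omega
        · rw [pvLength_pat]; exact hweq
      | inr hd =>
        obtain ⟨i, hi0, hiU, hweq⟩ := (pvRunRev_iff 48 10 (by norm_num) length hL _ hwlen).2 ⟨hr, hd⟩
        have hiU' : i < 10 - length + 1 := by push_cast at hiU; omega
        refine ⟨i, PySem.List.mem_pyRange_one.2 ⟨hi0, hiU'⟩, ?_⟩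
        rw [Bool.or_eq_true]; right
        rw [PySem.Str.isIn_iff_infix, pvDigitDesc i length hi0 (by omega)]
        apply (pvInfix_iff_window _ _ (by rw [List.length_reverse, pvLength_pat]; omega)).2
        refine ⟨j, ?_, ?_⟩
        · rw [List.length_reverse, pvLength_pat]; omega
        · rw [List.length_reverse, pvLength_pat]; exact hweq
    | inr hlet =>
      obtain ⟨hr, hud⟩ := hlet
      right
      have hlv : (PySem.Str.lower value).toList = PySem.Chars.lower value.toList := PySem.Str.toList_lower value
      have hlvlen : (PySem.Chars.lower value.toList).length = value.toList.length := by
        unfold PySem.Chars.lower; rw [List.length_map]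
      have hwlen : ((PySem.Chars.lower (pvWin value.toList length j)).length : Int) = length := by
        unfold PySem.Chars.lower
        rw [List.length_map, pvWin_length _ _ _ hj]; omega
      cases hud with
      | inl hu =>
        obtain ⟨i, hi0, hiU, hweq⟩ := (pvRun_iff 97 26 (by norm_num) length hL _ hwlen).2 ⟨hr, hu⟩
        have hiU' : i < 26 - length + 1 := by push_cast at hiU; omega
        refine ⟨i, PySem.List.mem_pyRange_one.2 ⟨hi0, hiU'⟩, ?_⟩
        rw [Bool.or_eq_true]; left
        rw [PySem.Str.isIn_iff_infix, pvLetterAsc i length, hlv]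
        apply (pvInfix_iff_window _ _ (by rw [pvLength_pat]; omega)).2
        refine ⟨j, ?_, ?_⟩
        · rw [pvLength_pat, hlvlen]; omega
        · rw [pvLength_pat, pvLowerWindow]; exact hweq
      | inr hd =>
        obtain ⟨i, hi0, hiU, hweq⟩ := (pvRunRev_iff 97 26 (by norm_num) length hL _ hwlen).2 ⟨hr, hd⟩
        have hiU' : i < 26 - length + 1 := by push_cast at hiU; omega
        refine ⟨i, PySem.List.mem_pyRange_one.2 ⟨hi0, hiU'⟩, ?_⟩
        rw [Bool.or_eq_true]; right
        rw [PySem.Str.isIn_iff_infix, pvLetterDesc i length, hlv]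
        apply (pvInfix_iff_window _ _ (by rw [List.length_reverse, pvLength_pat]; omega)).2
        refine ⟨j, ?_, ?_⟩
        · rw [List.length_reverse, pvLength_pat, hlvlen]; omega
        · rw [List.length_reverse, pvLength_pat, pvLowerWindow]; exact hweq

-- ---- B ⇔ the middle form ----

lemma pvNotBoth (length : Int) (hL : 1 ≤ length) (v : List Char) (j : Nat)
    (hj : j + length.toNat ≤ v.length)
    (hd : pvInRange 48 10 (pvWin v length j))
    (hl : pvInRange 97 26 (PySem.Chars.lower (pvWin v length j))) : False := by
  have hlen : (pvWin v length j).length = length.toNat := pvWin_length v length j hj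
  have hpos : 0 < (pvWin v length j).length := by omega
  have hc := hd _ (List.getElem_mem hpos)
  have hlow : (PySem.Chars.lower (pvWin v length j))[0]'(by unfold PySem.Chars.lower; rw [List.length_map]; omega)
      = PySem.Chars.lowerChar ((pvWin v length j)[0]'hpos) := by
    unfold PySem.Chars.lower
    rw [List.getElem_map]
  have hcl := hl _ (List.getElem_mem (l := PySem.Chars.lower (pvWin v length j)) (by unfold PySem.Chars.lower; rw [List.length_map]; omega))
  rw [hlow, pvLowerChar_lt _ (by omega)] at hcl
  omega

lemma pvB_iff (value : String) (length : Int) (hL : 1 ≤ length) :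
    contains_consecutive_chars_alt value length = true ↔ pvMid value length := by
  unfold contains_consecutive_chars_alt pvMid
  rw [if_neg (by omega), List.any_eq_true]
  constructor
  · rintro ⟨j, hmem, hbody⟩
    rw [PySem.List.mem_pyRange_one] at hmem
    obtain ⟨hj0, hjU⟩ := hmem
    rw [PySem.Str.len_eq] at hjU
    have hw : (PySem.Str.slice value (some j) (some (j + length))).toList = pvWin value.toList length j.toNat := by
      rw [PySem.Str.toList_slice, PySem.Chars.slice_eq_listSlice, PySem.List.slice_toNat _ hj0 (by omega)]
      unfold pvWin
      have : (j + length).toNat - j.toNat = length.toNat := by omega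
      rw [this]
    simp only [hw, PySem.Str.toList_lower] at hbody
    refine ⟨j.toNat, by omega, ?_⟩
    by_cases hd : (pvWin value.toList length j.toNat).all (fun c => decide ('0' ≤ c ∧ c ≤ '9')) = true
    · rw [if_pos hd] at hbody
      exact Or.inl ⟨(pvDigitAll_iff _).1 hd, (pvMonotone_iff _).1 hbody⟩
    · rw [if_neg hd, Bool.and_eq_true] at hbody
      exact Or.inr ⟨(pvLetterAll_iff _).1 hbody.1, (pvMonotone_iff _).1 hbody.2⟩
  · rintro ⟨jn, hjle, hcase⟩
    refine ⟨(jn : Int), PySem.List.mem_pyRange_one.2 ⟨by positivity, by rw [PySem.Str.len_eq]; omega⟩, ?_⟩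
    have hw : (PySem.Str.slice value (some (jn : Int)) (some ((jn : Int) + length))).toList = pvWin value.toList length jn := by
      rw [PySem.Str.toList_slice, PySem.Chars.slice_eq_listSlice, PySem.List.slice_toNat _ (by positivity) (by omega)]
      unfold pvWin
      have h1 : ((jn : Int) + length).toNat - (jn : Int).toNat = length.toNat := by omega
      have h2 : ((jn : Int)).toNat = jn := by omega
      rw [h1, h2]
    simp only [hw, PySem.Str.toList_lower]
    by_cases hd : (pvWin value.toList length jn).all (fun c => decide ('0' ≤ c ∧ c ≤ '9')) = true
    · rw [if_pos hd]
      cases hcase with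
      | inl h => exact (pvMonotone_iff _).2 h.2
      | inr h => exact absurd ((pvDigitAll_iff _).1 hd) (fun hdr => pvNotBoth length hL _ jn hjle hdr h.1)
    · rw [if_neg hd, Bool.and_eq_true]
      cases hcase with
      | inl h => exact absurd ((pvDigitAll_iff _).2 h.1) hd
      | inr h => exact ⟨(pvLetterAll_iff _).2 h.1, (pvMonotone_iff _).2 h.2⟩

-- ===== VERDICT (by name: the statement is the Claim_ definition above) =====
theorem contains_consecutive_chars_spec : Claim_equal_contains_consecutive_chars := by
  intro value length _
  unfold Spec_contains_consecutive_chars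
  by_cases hL : length ≤ 0
  · have hA : contains_consecutive_chars value length = true := by
      unfold contains_consecutive_chars
      rw [Bool.or_eq_true]; left
      rw [List.any_eq_true]
      refine ⟨0, PySem.List.mem_pyRange_one.2 ⟨le_refl 0, by omega⟩, ?_⟩
      rw [Bool.or_eq_true]; left
      rw [PySem.Str.isIn_iff_infix]
      have hnil : (PySem.Str.join "" ((PySem.List.pyRange 0 (0 + length) 1).map PySem.Int.toStr)).toList = [] := by
        rw [PySem.List.pyRange_one_eq_nil (by omega), List.map_nil, PySem.Str.toList_join, List.map_nil]
        rfl
      rw [hnil]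
      exact List.nil_infix
    unfold contains_consecutive_chars_alt
    rw [if_pos hL, hA]
  · have h1 : 1 ≤ length := by omega
    rw [Bool.eq_iff_iff]
    exact (pvA_iff value length h1).trans (pvB_iff value length h1).symm
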